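-- pv_equiv track=rewrite | github.com/tiendat8438/Python | Variables & Data types/THỐNG KÊ DỊCH TỄ.py | bfs
-- ===== SOURCE A (Python) =====
-- def bfs(A, n, m):
--     dir = [(-1, -1), (-1, 0), (-1, 1), (0, -1), (0, 1), (1, -1), (1, 0), (1, 1)]
--     visited = [[False for _ in range(m)] for _ in range(n)]
--     cnt = 0
--     for i in range(n):
--         for j in range(m):
--             if A[i][j] == -1:
--                 for dx, dy in dir:
--                     x, y = i + dx, j + dy
--                     if 0 <= x < n and 0 <= y < m and A[x][y] != 0 and not visited[x][y]:
--                         cnt += A[x][y]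
--                         visited[x][y] = True
--     return cnt
-- ===== SOURCE B (Python) =====
-- def bfs(A, n, m):
--     dirs = [(-1, -1), (-1, 0), (-1, 1), (0, -1), (0, 1), (1, -1), (1, 0), (1, 1)]
--     total = 0
--     for i in range(n):
--         for j in range(m):
--             if A[i][j] != 0:
--                 for dx, dy in dirs:
--                     x, y = i + dx, j + dy
--                     if 0 <= x < n and 0 <= y < m and A[x][y] == -1:
--                         total += A[i][j]
--                         break
--     return total
-- ===== Notes on version B (the rewrite author's own statement) =====
-- stated objective: simpler
-- what changed: Instead of A's pass over -1 cells that pushes contributions to neighbors guarded by a visited matrix, B scans each cell once and adds its value if any of its 8 neighbors is -1 (break on first), eliminating the visited matrix entirely.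
import Mathlib
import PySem

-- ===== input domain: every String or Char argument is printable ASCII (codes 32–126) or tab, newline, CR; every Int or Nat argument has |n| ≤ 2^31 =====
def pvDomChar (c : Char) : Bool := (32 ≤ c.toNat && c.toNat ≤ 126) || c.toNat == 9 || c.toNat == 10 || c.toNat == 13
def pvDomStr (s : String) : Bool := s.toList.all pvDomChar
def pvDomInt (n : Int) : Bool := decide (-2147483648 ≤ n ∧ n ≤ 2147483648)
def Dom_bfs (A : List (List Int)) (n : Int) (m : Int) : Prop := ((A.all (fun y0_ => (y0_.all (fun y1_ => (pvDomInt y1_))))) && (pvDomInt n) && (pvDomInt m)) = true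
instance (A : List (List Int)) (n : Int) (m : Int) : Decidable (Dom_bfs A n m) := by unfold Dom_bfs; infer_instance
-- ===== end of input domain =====

-- B drops A's visited matrix: it scans each cell once and adds its value if any of its 8
-- neighbours equals -1 (first hit wins), instead of pushing contributions from -1 cells
-- to their neighbours; same O(n*m) cost, simpler decomposition.

-- ===== PORT A =====
def pvDirs : List (Int × Int) :=
  [(-1, -1), (-1, 0), (-1, 1), (0, -1), (0, 1), (1, -1), (1, 0), (1, 1)]

-- A[i][j]: exact under Pre_bfs (every evaluated index is in range, so the defaults are never used)
def pvGet (A : List (List Int)) (i j : Int) : Int :=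
  PySem.List.pyGetD (PySem.List.pyGetD A i []) j 0

-- visited[x][y]: exact under Pre_bfs for the in-bounds x, y the code reads/writes
def pvVGet (v : List (List Bool)) (x y : Int) : Bool :=
  PySem.List.pyGetD (PySem.List.pyGetD v x []) y false

def pvVSet (v : List (List Bool)) (x y : Int) : List (List Bool) :=
  PySem.List.pySetD v x (PySem.List.pySetD (PySem.List.pyGetD v x []) y true)

-- body of A's innermost 'for dx, dy in dir' loop
def pvStepDir (A : List (List Int)) (n m i j : Int)
    (st : Int × List (List Bool)) (d : Int × Int) : Int × List (List Bool) :=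
  let x := i + d.1
  let y := j + d.2
  if 0 ≤ x ∧ x < n ∧ 0 ≤ y ∧ y < m ∧ pvGet A x y ≠ 0 ∧ pvVGet st.2 x y = false then
    (st.1 + pvGet A x y, pvVSet st.2 x y)
  else st

-- body of A's 'for j in range(m)' loop at cell c
def pvStepCell (A : List (List Int)) (n m : Int)
    (st : Int × List (List Bool)) (c : Int × Int) : Int × List (List Bool) :=
  if pvGet A c.1 c.2 = -1 then pvDirs.foldl (pvStepDir A n m c.1 c.2) st else st

def bfs (A : List (List Int)) (n : Int) (m : Int) : Int :=
  ((PySem.List.pyRange 0 n 1).foldl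
    (fun st i => (PySem.List.pyRange 0 m 1).foldl (fun st j => pvStepCell A n m st (i, j)) st)
    (0, List.replicate n.toNat (List.replicate m.toNat false))).1

-- ===== PORT B =====
-- 'for dx, dy in dirs: … break' — true iff some in-bounds neighbour of (i, j) is -1
def pvHasM1 (A : List (List Int)) (n m i j : Int) : Bool :=
  pvDirs.any (fun d =>
    decide (0 ≤ i + d.1 ∧ i + d.1 < n ∧ 0 ≤ j + d.2 ∧ j + d.2 < m ∧
            pvGet A (i + d.1) (j + d.2) = -1))

def bfs_alt (A : List (List Int)) (n : Int) (m : Int) : Int :=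
  (PySem.List.pyRange 0 n 1).foldl (fun tot i =>
    (PySem.List.pyRange 0 m 1).foldl (fun tot j =>
      if pvGet A i j ≠ 0 ∧ pvHasM1 A n m i j = true then tot + pvGet A i j else tot) tot) 0

-- ===== PRECONDITION & SPEC =====
-- Pre_bfs excludes exactly the inputs where Python A raises IndexError: when both loops run
-- (0 < n and 0 < m), every scanned row index must exist and every scanned row must have m columns.
def Pre_bfs (A : List (List Int)) (n : Int) (m : Int) : Prop :=
  0 < n → 0 < m → n ≤ (A.length : Int) ∧ ∀ row ∈ A.take n.toNat, m ≤ (row.length : Int)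
instance (A : List (List Int)) (n : Int) (m : Int) : Decidable (Pre_bfs A n m) := by
  unfold Pre_bfs; infer_instance

def pvWitness_bfs : List (List Int) × Int × Int := ([[-1, 2], [3, 0]], 2, 2)

def Spec_bfs (A : List (List Int)) (n : Int) (m : Int) (out : Int) : Prop := out = bfs_alt A n m
instance (A : List (List Int)) (n : Int) (m : Int) (out : Int) : Decidable (Spec_bfs A n m out) := by
  unfold Spec_bfs; infer_instance

-- ===== CLAIM (what is proved, stated in full; the proofs are below) =====
def Claim_equal_bfs : Prop := ∀ (A : List (List Int)) (n : Int) (m : Int), Dom_bfs A n m → Pre_bfs A n m → Spec_bfs A n m (bfs A n m)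

-- ===== LEMMAS AND PROOFS =====

theorem pvFoldl_flatMap {α β σ : Type} (f : σ → β → σ) (g : α → List β) :
    ∀ (L : List α) (s : σ), L.foldl (fun s a => (g a).foldl f s) s = (L.flatMap g).foldl f s := by
  intro L
  induction L with
  | nil => intro s; rfl
  | cons a L ih => intro s; simp [List.flatMap_cons, List.foldl_append, ih]

theorem pvSum_map_update {α : Type} (x : α) (f g : α → Int) :
    ∀ (L : List α), x ∈ L → L.Nodup → (∀ a ∈ L, a ≠ x → f a = g a) →
      (L.map f).sum = (L.map g).sum + (f x - g x) := by
  intro L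
  induction L with
  | nil => intro hx; cases hx
  | cons a L ih =>
    intro hx hnd hfg
    rcases List.mem_cons.mp hx with h | h
    · subst h
      have heq : ∀ b ∈ L, f b = g b := by
        intro b hb
        exact hfg b (List.mem_cons_of_mem _ hb)
          (fun he => (List.nodup_cons.mp hnd).1 (he ▸ hb))
      rw [List.map_cons, List.map_cons, List.sum_cons, List.sum_cons,
          List.map_congr_left heq]
      ring
    · have hna : a ≠ x := fun he => (List.nodup_cons.mp hnd).1 (he ▸ h)
      have := ih h (List.nodup_cons.mp hnd).2 (fun b hb => hfg b (List.mem_cons_of_mem _ hb))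
      rw [List.map_cons, List.map_cons, List.sum_cons, List.sum_cons, this,
          hfg a (List.mem_cons_self) hna]
      ring

-- the sum both programs compute, parameterised by the set of counted cells
def pvSsum (A : List (List Int)) (n m : Int) (Q : Int → Int → Bool) : Int :=
  ((PySem.List.pyRange 0 n 1).map (fun i =>
    ((PySem.List.pyRange 0 m 1).map (fun j => if Q i j then pvGet A i j else 0)).sum)).sum

theorem pvSsum_congr (A : List (List Int)) (n m : Int) (Q Q' : Int → Int → Bool)
    (h : ∀ a b, 0 ≤ a → a < n → 0 ≤ b → b < m → Q a b = Q' a b) :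
    pvSsum A n m Q = pvSsum A n m Q' := by
  unfold pvSsum
  refine congrArg List.sum (List.map_congr_left ?_)
  intro i hi
  refine congrArg List.sum (List.map_congr_left ?_)
  intro j hj
  rw [PySem.List.mem_pyRange_one] at hi hj
  rw [h i j hi.1 hi.2 hj.1 hj.2]

def pvQset (Q : Int → Int → Bool) (x y : Int) : Int → Int → Bool :=
  fun a b => if a = x ∧ b = y then true else Q a b

theorem pvSsum_update (A : List (List Int)) (n m : Int) (Q : Int → Int → Bool) (x y : Int)
    (hx : 0 ≤ x) (hxn : x < n) (hy : 0 ≤ y) (hym : y < m) (hQ : Q x y = false) :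
    pvSsum A n m (pvQset Q x y) = pvSsum A n m Q + pvGet A x y := by
  have hxmem : x ∈ PySem.List.pyRange 0 n 1 := (PySem.List.mem_pyRange_one).mpr ⟨hx, hxn⟩
  have hymem : y ∈ PySem.List.pyRange 0 m 1 := (PySem.List.mem_pyRange_one).mpr ⟨hy, hym⟩
  have hout : ∀ a ∈ PySem.List.pyRange 0 n 1, a ≠ x →
      (fun i => ((PySem.List.pyRange 0 m 1).map
        (fun j => if pvQset Q x y i j then pvGet A i j else 0)).sum) a
      = (fun i => ((PySem.List.pyRange 0 m 1).map
        (fun j => if Q i j then pvGet A i j else 0)).sum) a := by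
    intro a _ hax
    refine congrArg List.sum (List.map_congr_left ?_)
    intro b _
    simp [pvQset, hax]
  have hin : ∀ b ∈ PySem.List.pyRange 0 m 1, b ≠ y →
      (fun j => if pvQset Q x y x j then pvGet A x j else 0) b
      = (fun j => if Q x j then pvGet A x j else 0) b := by
    intro b _ hby
    simp [pvQset, hby]
  have h1 := pvSum_map_update x _ _ (PySem.List.pyRange 0 n 1) hxmem
    (PySem.List.nodup_pyRange_one 0 n) hout
  have h2 := pvSum_map_update y _ _ (PySem.List.pyRange 0 m 1) hymem
    (PySem.List.nodup_pyRange_one 0 m) hin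
  simp only [] at h1 h2
  unfold pvSsum
  rw [h1, h2]
  simp [pvQset, hQ]

-- reading an all-false row
theorem pvGetD_false (l : List Bool) (h : ∀ b ∈ l, b = false) (y : Int) :
    PySem.List.pyGetD l y false = false := by
  by_cases hr : PySem.Raise.InRange l.length y
  · exact h _ (PySem.List.pyGetD_mem l false hr)
  · unfold PySem.List.pyGetD
    rw [(PySem.List.pyGet?_eq_none_iff l y).mpr hr]
    rfl

-- the invariant tying A's loop state to a set of counted cells
def pvInv (A : List (List Int)) (n m : Int) (Q : Int → Int → Bool)
    (st : Int × List (List Bool)) : Prop :=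
  st.1 = pvSsum A n m Q ∧
  st.2.length = n.toNat ∧
  (∀ row ∈ st.2, row.length = m.toNat) ∧
  ∀ x y : Int, 0 ≤ x → x < n → 0 ≤ y → y < m → pvVGet st.2 x y = Q x y

theorem pvInv_congr {A : List (List Int)} {n m : Int} {Q Q' : Int → Int → Bool}
    {st : Int × List (List Bool)}
    (h : ∀ a b, 0 ≤ a → a < n → 0 ≤ b → b < m → Q a b = Q' a b)
    (hI : pvInv A n m Q st) : pvInv A n m Q' st := by
  obtain ⟨h1, h2, h3, h4⟩ := hI
  exact ⟨h1.trans (pvSsum_congr A n m Q Q' h), h2, h3,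
    fun x y hx hxn hy hym => (h4 x y hx hxn hy hym).trans (h x y hx hxn hy hym)⟩

theorem pvVGet_pvVSet (v : List (List Bool)) (n m x y a b : Int)
    (hlen : v.length = n.toNat) (hrows : ∀ row ∈ v, row.length = m.toNat)
    (hx : 0 ≤ x) (hxn : x < n) (hy : 0 ≤ y) (hym : y < m)
    (ha : 0 ≤ a) (han : a < n) (hb : 0 ≤ b) (hbm : b < m) :
    pvVGet (pvVSet v x y) a b = if a = x ∧ b = y then true else pvVGet v a b := by
  unfold pvVGet pvVSet
  rw [PySem.List.pySetD_of_nonneg _ _ hx]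
  rw [PySem.List.pyGetD_eq_getElem _ [] ha (by rw [List.length_set]; omega)]
  rw [List.getElem_set]
  by_cases hax : a = x
  · subst hax
    rw [if_pos rfl]
    rw [PySem.List.pySetD_of_nonneg _ _ hy, PySem.List.pyGetD_eq_getElem v [] hx (by omega)]
    have hrl : (v[a.toNat]'(by omega)).length = m.toNat := hrows _ (List.getElem_mem _)
    rw [PySem.List.pyGetD_eq_getElem _ false hb (by rw [List.length_set, hrl]; omega)]
    rw [List.getElem_set]
    by_cases hby : b = y
    · subst hby
      rw [if_pos rfl]
      simp
    · rw [if_neg (by omega), if_neg (by simp [hby])]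
      rw [PySem.List.pyGetD_eq_getElem _ false hb (by rw [hrl]; omega)]
  · rw [if_neg (by omega), if_neg (fun hh => hax hh.1)]
    rw [PySem.List.pyGetD_eq_getElem v [] ha (by omega),
        PySem.List.pyGetD_eq_getElem _ false hb
          (by rw [hrows _ (List.getElem_mem _)]; omega)]

theorem pvInv_stepDir (A : List (List Int)) (n m i j : Int) (Q : Int → Int → Bool)
    (st : Int × List (List Bool)) (d : Int × Int) (h : pvInv A n m Q st) :
    pvInv A n m
      (fun a b => Q a b || (decide (a = i + d.1 ∧ b = j + d.2) && decide (pvGet A a b ≠ 0)))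
      (pvStepDir A n m i j st d) := by
  obtain ⟨h1, h2, h3, h4⟩ := h
  unfold pvStepDir
  by_cases hc : 0 ≤ i + d.1 ∧ i + d.1 < n ∧ 0 ≤ j + d.2 ∧ j + d.2 < m ∧
      pvGet A (i + d.1) (j + d.2) ≠ 0 ∧ pvVGet st.2 (i + d.1) (j + d.2) = false
  · rw [if_pos hc]
    obtain ⟨hx, hxn, hy, hym, hnz, hvf⟩ := hc
    have hQxy : Q (i + d.1) (j + d.2) = false := by
      rw [← h4 _ _ hx hxn hy hym]; exact hvf
    have hsetlen : (pvVSet st.2 (i + d.1) (j + d.2)).length = n.toNat := by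
      simp [pvVSet, PySem.List.pySetD_of_nonneg _ _ hx, h2]
    have hsetrows : ∀ row ∈ pvVSet st.2 (i + d.1) (j + d.2), row.length = m.toNat := by
      intro row hrow
      rw [pvVSet, PySem.List.pySetD_of_nonneg _ _ hx] at hrow
      rcases List.mem_or_eq_of_mem_set hrow with hmem | heq
      · exact h3 _ hmem
      · subst heq
        rw [PySem.List.pySetD_of_nonneg _ _ hy, List.length_set]
        rw [PySem.List.pyGetD_eq_getElem _ [] hx (by omega)]
        exact h3 _ (List.getElem_mem _)
    refine pvInv_congr (Q := pvQset Q (i + d.1) (j + d.2)) ?_ ⟨?_, hsetlen, hsetrows, ?_⟩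
    · intro a b _ _ _ _
      by_cases hab : a = i + d.1 ∧ b = j + d.2
      · simp [pvQset, hab, hnz]
      · simp [pvQset, hab]
    · show st.1 + pvGet A (i + d.1) (j + d.2) = pvSsum A n m (pvQset Q (i + d.1) (j + d.2))
      rw [pvSsum_update A n m Q _ _ hx hxn hy hym hQxy, h1]
    · intro a b ha han hb hbm
      rw [pvVGet_pvVSet st.2 n m _ _ a b h2 h3 hx hxn hy hym ha han hb hbm]
      by_cases hab : a = i + d.1 ∧ b = j + d.2
      · simp [pvQset, hab]
      · rw [if_neg hab, h4 _ _ ha han hb hbm]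
        simp [pvQset, hab]
  · rw [if_neg hc]
    refine pvInv_congr (Q := Q) ?_ ⟨h1, h2, h3, h4⟩
    intro a b ha han hb hbm
    by_cases hab : a = i + d.1 ∧ b = j + d.2
    · obtain ⟨rfl, rfl⟩ := hab
      by_cases hnz : pvGet A (i + d.1) (j + d.2) ≠ 0
      · have hvt : pvVGet st.2 (i + d.1) (j + d.2) = true := by
          rcases Bool.eq_false_or_eq_true (pvVGet st.2 (i + d.1) (j + d.2)) with ht | hf
          · exact ht
          · exact absurd ⟨ha, han, hb, hbm, hnz, hf⟩ hc
        rw [h4 _ _ ha han hb hbm] at hvt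
        simp [hvt]
      · simp only [ne_eq, not_not] at hnz
        simp [hnz]
    · simp [hab]

theorem pvInv_foldl_dirs (A : List (List Int)) (n m i j : Int) :
    ∀ (ds : List (Int × Int)) (Q : Int → Int → Bool) (st : Int × List (List Bool)),
      pvInv A n m Q st →
      pvInv A n m
        (fun a b => Q a b ||
          (ds.any (fun d => decide (a = i + d.1 ∧ b = j + d.2)) && decide (pvGet A a b ≠ 0)))
        (ds.foldl (pvStepDir A n m i j) st) := by
  intro ds
  induction ds with
  | nil =>
    intro Q st h
    refine pvInv_congr (Q := Q) ?_ h
    intro a b _ _ _ _; simp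
  | cons d ds ih =>
    intro Q st h
    have h2 := ih _ _ (pvInv_stepDir A n m i j Q st d h)
    rw [List.foldl_cons]
    refine pvInv_congr ?_ h2
    intro a b _ _ _ _
    simp only [List.any_cons]
    cases Q a b <;> cases hd : decide (a = i + d.1 ∧ b = j + d.2) <;>
      cases hds : ds.any (fun d => decide (a = i + d.1 ∧ b = j + d.2)) <;>
      cases hnz : decide (pvGet A a b ≠ 0) <;> simp

-- contribution of processing one cell c of the grid scan
def pvQcell (A : List (List Int)) (c : Int × Int) (a b : Int) : Bool :=
  decide (pvGet A c.1 c.2 = -1) &&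
    (pvDirs.any (fun d => decide (a = c.1 + d.1 ∧ b = c.2 + d.2)) && decide (pvGet A a b ≠ 0))

theorem pvInv_stepCell (A : List (List Int)) (n m : Int) (Q : Int → Int → Bool)
    (st : Int × List (List Bool)) (c : Int × Int) (h : pvInv A n m Q st) :
    pvInv A n m (fun a b => Q a b || pvQcell A c a b) (pvStepCell A n m st c) := by
  unfold pvStepCell
  by_cases hm1 : pvGet A c.1 c.2 = -1
  · rw [if_pos hm1]
    refine pvInv_congr ?_ (pvInv_foldl_dirs A n m c.1 c.2 pvDirs Q st h)
    intro a b _ _ _ _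
    simp [pvQcell, hm1]
  · rw [if_neg hm1]
    refine pvInv_congr (Q := Q) ?_ h
    intro a b _ _ _ _
    simp [pvQcell, hm1]

theorem pvInv_foldl_cells (A : List (List Int)) (n m : Int) :
    ∀ (L : List (Int × Int)) (Q : Int → Int → Bool) (st : Int × List (List Bool)),
      pvInv A n m Q st →
      pvInv A n m (fun a b => Q a b || L.any (fun c => pvQcell A c a b))
        (L.foldl (pvStepCell A n m) st) := by
  intro L
  induction L with
  | nil =>
    intro Q st h
    refine pvInv_congr (Q := Q) ?_ h
    intro a b _ _ _ _; simp
  | cons c L ih =>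
    intro Q st h
    have h2 := ih _ _ (pvInv_stepCell A n m Q st c h)
    rw [List.foldl_cons]
    refine pvInv_congr ?_ h2
    intro a b _ _ _ _
    simp only [List.any_cons]
    cases Q a b <;> cases hc : pvQcell A c a b <;>
      cases hL : L.any (fun c => pvQcell A c a b) <;> simp

theorem pvInv_init (A : List (List Int)) (n m : Int) :
    pvInv A n m (fun _ _ => false)
      (0, List.replicate n.toNat (List.replicate m.toNat false)) := by
  refine ⟨?_, by simp, ?_, ?_⟩
  · simp [pvSsum]
  · intro row hr
    rw [List.eq_of_mem_replicate hr]
    simp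
  · intro x y _ _ _ _
    unfold pvVGet
    apply pvGetD_false
    intro b hb
    have hrow : ∀ r ∈ PySem.List.pyGetD (List.replicate n.toNat (List.replicate m.toNat false)) x [],
        r = false := by
      by_cases hr : PySem.Raise.InRange (List.replicate n.toNat (List.replicate m.toNat false)).length x
      · have := PySem.List.pyGetD_mem (xs := List.replicate n.toNat (List.replicate m.toNat false))
          (i := x) (d := []) hr
        rw [List.eq_of_mem_replicate this]
        intro r hrm
        exact List.eq_of_mem_replicate hrm
      · unfold PySem.List.pyGetD
        rw [(PySem.List.pyGet?_eq_none_iff _ _).mpr hr]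
        intro r hrm
        cases hrm
    exact hrow b hb

def pvCells (n m : Int) : List (Int × Int) :=
  (PySem.List.pyRange 0 n 1).flatMap (fun i => (PySem.List.pyRange 0 m 1).map (fun j => (i, j)))

theorem pvMem_cells (n m : Int) (c : Int × Int) :
    c ∈ pvCells n m ↔ 0 ≤ c.1 ∧ c.1 < n ∧ 0 ≤ c.2 ∧ c.2 < m := by
  obtain ⟨a, b⟩ := c
  simp only [pvCells, List.mem_flatMap, List.mem_map, PySem.List.mem_pyRange_one]
  constructor
  · rintro ⟨i, hi, j, hj, hij⟩
    injection hij with e1 e2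
    subst e1; subst e2
    exact ⟨hi.1, hi.2, hj.1, hj.2⟩
  · rintro ⟨h1, h2, h3, h4⟩
    exact ⟨a, ⟨h1, h2⟩, b, ⟨h3, h4⟩, rfl⟩

theorem pvDirs_neg_mem : ∀ d ∈ pvDirs, ((-d.1, -d.2) ∈ pvDirs) := by decide

theorem pvCond_eq (A : List (List Int)) (n m a b : Int) :
    ((pvCells n m).any (fun c => pvQcell A c a b)) =
      (decide (pvGet A a b ≠ 0) && pvHasM1 A n m a b) := by
  rw [Bool.eq_iff_iff]
  simp only [List.any_eq_true, pvQcell, pvHasM1, Bool.and_eq_true, decide_eq_true_eq]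
  constructor
  · rintro ⟨c, hc, hm1, ⟨d, hd, hab1, hab2⟩, hnz⟩
    rw [pvMem_cells] at hc
    refine ⟨hnz, ⟨(-d.1, -d.2), pvDirs_neg_mem d hd, ?_⟩⟩
    have e1 : a + -d.1 = c.1 := by omega
    have e2 : b + -d.2 = c.2 := by omega
    rw [e1, e2]
    exact ⟨hc.1, hc.2.1, hc.2.2.1, hc.2.2.2, hm1⟩
  · rintro ⟨hnz, d, hd, h1, h2, h3, h4, hm1⟩
    refine ⟨(a + d.1, b + d.2), ?_, hm1, ⟨(-d.1, -d.2), pvDirs_neg_mem d hd, by omega, by omega⟩, hnz⟩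
    rw [pvMem_cells]
    exact ⟨h1, h2, h3, h4⟩

theorem pvB_eq_Ssum (A : List (List Int)) (n m : Int) :
    bfs_alt A n m =
      pvSsum A n m (fun a b => decide (pvGet A a b ≠ 0) && pvHasM1 A n m a b) := by
  unfold bfs_alt pvSsum
  have inner : ∀ (i t : Int),
      (PySem.List.pyRange 0 m 1).foldl
        (fun tot j => if pvGet A i j ≠ 0 ∧ pvHasM1 A n m i j = true then tot + pvGet A i j else tot) t
      = t + ((PySem.List.pyRange 0 m 1).map
          (fun j => if (decide (pvGet A i j ≠ 0) && pvHasM1 A n m i j) = true then pvGet A i j else 0)).sum := by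
    intro i t
    rw [show (fun tot j => if pvGet A i j ≠ 0 ∧ pvHasM1 A n m i j = true then tot + pvGet A i j else tot)
        = (fun (tot : Int) (j : Int) => tot +
            (if (decide (pvGet A i j ≠ 0) && pvHasM1 A n m i j) = true then pvGet A i j else 0)) from ?_]
    · exact PySem.List.foldl_add _ _ _
    · funext tot j
      by_cases hP : pvGet A i j ≠ 0 ∧ pvHasM1 A n m i j = true
      · simp [hP]
      · rw [if_neg hP, if_neg (by simpa using hP)]
        simp
  simp only [inner]
  rw [PySem.List.foldl_add]
  simp

-- ===== VERDICT (by name: the statement is the Claim_ definition above) =====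
theorem bfs_spec : Claim_equal_bfs := by
  intro A n m _ _
  show bfs A n m = bfs_alt A n m
  have hinit := pvInv_init A n m
  have hmain := pvInv_foldl_cells A n m (pvCells n m) _ _ hinit
  unfold bfs
  rw [show (fun (st : Int × List (List Bool)) (i : Int) =>
        (PySem.List.pyRange 0 m 1).foldl (fun st j => pvStepCell A n m st (i, j)) st)
      = (fun st i => (((PySem.List.pyRange 0 m 1).map (fun j => (i, j))).foldl
          (pvStepCell A n m) st)) from by funext st i; rw [List.foldl_map]]
  rw [pvFoldl_flatMap (pvStepCell A n m) _ (PySem.List.pyRange 0 n 1) _]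
  have hm1 : (List.foldl (pvStepCell A n m)
      (0, List.replicate n.toNat (List.replicate m.toNat false))
      (List.flatMap (fun i => List.map (fun j => (i, j)) (PySem.List.pyRange 0 m 1))
        (PySem.List.pyRange 0 n 1))).1
      = pvSsum A n m (fun a b => false || (pvCells n m).any fun c => pvQcell A c a b) :=
    hmain.1
  rw [hm1, pvB_eq_Ssum]
  apply pvSsum_congr
  intro a b _ _ _ _
  rw [Bool.false_or, pvCond_eq A n m a b]
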